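-- pv_equiv track=rewrite | github.com/Alonso94/scene_graph_annotator | clio_annotator/src/clio_aeg_annotation/clio_aeg_llm.py | get_related_nodes_multi_hop
-- ===== SOURCE A (Python) =====
-- from typing import Union, List, Dict, Tuple
--
-- def get_related_nodes(graph: Dict, node_id: str, inverse=False, bidirectional=False, valid_relations=None, include_augmented_edges=False):
--     related = []
--     if not inverse:
--         edges = graph.get('edges', {})
--         augmented_edges = graph.get('augmented_edges', {}) if include_augmented_edges else {}
--         for edge_key in edges:
--             if isinstance(edge_key, tuple) and edge_key[0] == node_id:
--                 if valid_relations is None or edges[edge_key] in valid_relations: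
--                     related.append((edge_key[1], edges[edge_key]))
--         for edge_key in augmented_edges:
--             if isinstance(edge_key, tuple) and edge_key[0] == node_id:
--                 if valid_relations is None or augmented_edges[edge_key] in valid_relations:
--                     related.append((edge_key[1], augmented_edges[edge_key]))
--     else:
--         edges = graph.get('edges', {})
--         augmented_edges = graph.get('augmented_edges', {}) if include_augmented_edges else {}
--         for edge_key in edges:
--             if isinstance(edge_key, tuple) and edge_key[1] == node_id:
--                 if valid_relations is None or edges[edge_key] in valid_relations:
--                     related.append((edge_key[0], edges[edge_key]))
--         for edge_key in augmented_edges: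
--             if isinstance(edge_key, tuple) and edge_key[1] == node_id:
--                 if valid_relations is None or augmented_edges[edge_key] in valid_relations:
--                     related.append((edge_key[0], augmented_edges[edge_key]))
--
--     if bidirectional:
--         related += get_related_nodes(graph, node_id, inverse=not inverse, valid_relations=valid_relations, include_augmented_edges=include_augmented_edges)
--
--     return related
--
-- def get_related_nodes_multi_hop(graph: Dict, node_id: str, max_depth=-1, inverse=False, bidirectional=False, valid_relations=None, include_augmented_edges=False):
--     def recurse(node_id, depth, inv, seen):
--         rel_nodes = {}
--         for rel_id, relation in get_related_nodes(graph, node_id, inverse=inv, valid_relations=valid_relations, include_augmented_edges=include_augmented_edges):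
--             if rel_id not in seen:
--                 rel_nodes[rel_id] = relation
--                 seen.add(rel_id)
--                 if max_depth > 0:
--                     rel_nodes.update(recurse(rel_id, depth - 1, inv, seen))
--                 else:
--                     rel_nodes.update(recurse(rel_id, -1, inv, seen))
--         return rel_nodes
--     seen = {node_id}
--     return recurse(node_id, max_depth, inverse, seen)
-- ===== SOURCE B (Python) =====
-- def get_related_nodes_multi_hop(graph, node_id, max_depth=-1, inverse=False, bidirectional=False, valid_relations=None, include_augmented_edges=False):
--     # Build the adjacency index once (A rescans every edge dict at each visited node).
--     edge_maps = [graph.get('edges', {})]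
--     if include_augmented_edges:
--         edge_maps.append(graph.get('augmented_edges', {}))
--     pairs = []
--     for edge_map in edge_maps:
--         for key, rel in edge_map.items():
--             if valid_relations is None or rel in valid_relations:
--                 if inverse:
--                     pairs.append((key[1], (key[0], rel)))
--                 else:
--                     pairs.append((key[0], (key[1], rel)))
--     adj = {}
--     for src, e in pairs:
--         adj.setdefault(src, []).append(e)
--     # DFS from node_id in insertion order, collecting each node the first time it is reached.
--     related = {}
--     seen = {node_id}
--     def dfs(nid):
--         for dst, rel in adj.get(nid, ()):
--             if dst not in seen:
--                 seen.add(dst)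
--                 related[dst] = rel
--                 dfs(dst)
--     dfs(node_id)
--     return related
-- ===== Notes on version B (the rewrite author's own statement) =====
-- stated objective: alternative
-- what changed: B builds a source->neighbours adjacency index over both edge dicts once (filtering by valid_relations while building it) and runs one DFS threading a single result dict and seen set, instead of A's rescanning every edge of both dicts at each visited node and merging per-node local dicts.
import Mathlib
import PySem

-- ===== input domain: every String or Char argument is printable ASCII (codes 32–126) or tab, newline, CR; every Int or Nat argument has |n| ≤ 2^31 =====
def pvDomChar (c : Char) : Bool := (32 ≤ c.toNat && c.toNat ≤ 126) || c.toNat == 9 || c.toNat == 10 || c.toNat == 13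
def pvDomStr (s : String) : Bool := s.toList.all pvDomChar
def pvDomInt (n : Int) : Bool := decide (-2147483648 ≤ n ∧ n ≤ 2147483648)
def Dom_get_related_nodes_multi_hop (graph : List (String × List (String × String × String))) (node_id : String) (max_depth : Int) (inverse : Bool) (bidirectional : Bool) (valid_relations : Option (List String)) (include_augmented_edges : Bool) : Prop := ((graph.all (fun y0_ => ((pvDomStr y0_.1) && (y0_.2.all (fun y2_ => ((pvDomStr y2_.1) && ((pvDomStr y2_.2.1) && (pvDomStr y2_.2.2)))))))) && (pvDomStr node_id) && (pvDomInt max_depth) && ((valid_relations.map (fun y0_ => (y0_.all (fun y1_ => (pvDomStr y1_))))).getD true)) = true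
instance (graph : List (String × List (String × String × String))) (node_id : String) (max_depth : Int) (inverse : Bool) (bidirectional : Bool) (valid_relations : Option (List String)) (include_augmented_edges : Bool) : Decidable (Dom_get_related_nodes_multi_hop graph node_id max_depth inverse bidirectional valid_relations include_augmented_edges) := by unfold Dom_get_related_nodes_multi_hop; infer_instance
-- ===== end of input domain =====

-- ===== PORT A =====
-- A (get_related_nodes_multi_hop) ignores `max_depth` (its depth test reads the outer
-- constant, both branches recurse) and never passes `bidirectional` down; both ports keep
-- those parameters exactly as the Python does.  A rescans the whole edge dicts once per
-- visited node; B below builds an adjacency index once and runs the same DFS on it.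

-- graph['edges'] / graph['augmented_edges'] as a Python dict {(src, dst): rel} (duplicate
-- keys collapse, last value wins, first position kept — dict semantics on both sides)
def pvEdgeItems (graph : List (String × List (String × String × String))) (key : String) :
    List ((String × String) × String) :=
  (PySem.Dict.ofList
    (((PySem.Dict.ofList graph).getD key []).map (fun e => ((e.1, e.2.1), e.2.2)))).items

-- 'valid_relations is None or rel in valid_relations'
def pvOkRel (vr : Option (List String)) (r : String) : Bool :=
  match vr with
  | none => true
  | some l => l.contains r

-- get_related_nodes without the bidirectional tail (the two symmetric loops)
def pvGrnCore (graph : List (String × List (String × String × String))) (nid : String)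
    (inv : Bool) (vr : Option (List String)) (iae : Bool) : List (String × String) :=
  let edges := pvEdgeItems graph "edges"
  let augmented := if iae then pvEdgeItems graph "augmented_edges" else []
  if inv = false then
    List.foldl
      (fun related p => if p.1.1 == nid && pvOkRel vr p.2 then related ++ [(p.1.2, p.2)] else related)
      (List.foldl
        (fun related p => if p.1.1 == nid && pvOkRel vr p.2 then related ++ [(p.1.2, p.2)] else related)
        [] edges) augmented
  else
    List.foldl
      (fun related p => if p.1.2 == nid && pvOkRel vr p.2 then related ++ [(p.1.1, p.2)] else related)
      (List.foldl
        (fun related p => if p.1.2 == nid && pvOkRel vr p.2 then related ++ [(p.1.1, p.2)] else related)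
        [] edges) augmented

-- get_related_nodes (the bidirectional call has bidirectional=False, i.e. the core)
def pvGrn (graph : List (String × List (String × String × String))) (nid : String)
    (inv : Bool) (bidir : Bool) (vr : Option (List String)) (iae : Bool) :
    List (String × String) :=
  let related := pvGrnCore graph nid inv vr iae
  if bidir then related ++ pvGrnCore graph nid (!inv) vr iae else related

-- recurse(node_id, depth, inv, seen): the loop over get_related_nodes, a local dict
-- rel_nodes merged with each child's dict; `fuel` only makes the recursion total (one unit
-- per nesting level; the initial fuel below strictly exceeds any reachable depth)
def pvGoA (graph : List (String × List (String × String × String)))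
    (vr : Option (List String)) (iae : Bool) (max_depth : Int) (inv : Bool) :
    Nat → List (String × String) → Int → PySem.Dict String String → PySem.Set String →
    PySem.Dict String String × PySem.Set String
  | _, [], _, rel_nodes, seen => (rel_nodes, seen)
  | 0, _ :: _, _, rel_nodes, seen => (rel_nodes, seen)
  | fuel+1, (rid, rel) :: rest, depth, rel_nodes, seen =>
    if seen.contains rid then
      pvGoA graph vr iae max_depth inv (fuel+1) rest depth rel_nodes seen
    else
      let rel_nodes' := rel_nodes.insert rid rel
      let seen' := seen.add rid
      let child := pvGoA graph vr iae max_depth inv fuel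
        (pvGrn graph rid inv false vr iae)
        (if max_depth > 0 then depth - 1 else -1) PySem.Dict.empty seen'
      pvGoA graph vr iae max_depth inv (fuel+1) rest depth
        (rel_nodes'.update child.1.items) child.2
  termination_by fuel rest => (fuel, rest.length)
  decreasing_by all_goals simp_wf <;> omega

def get_related_nodes_multi_hop (graph : List (String × List (String × String × String))) (node_id : String) (max_depth : Int) (inverse : Bool) (bidirectional : Bool) (valid_relations : Option (List String)) (include_augmented_edges : Bool) : List (String × String) :=
  let fuel := 2 * (((PySem.Dict.ofList graph).getD "edges" []).length
    + ((PySem.Dict.ofList graph).getD "augmented_edges" []).length) + 1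
  (pvGoA graph valid_relations include_augmented_edges max_depth inverse fuel
    (pvGrn graph node_id inverse false valid_relations include_augmented_edges)
    max_depth PySem.Dict.empty (PySem.Set.ofList [node_id])).1.items

-- ===== PORT B =====
-- (src, (dst, rel)) for every edge passing the relation filter, both edge dicts in order
def pvPairs (graph : List (String × List (String × String × String))) (inv : Bool)
    (vr : Option (List String)) (iae : Bool) : List (String × (String × String)) :=
  let maps := [pvEdgeItems graph "edges"]
    ++ (if iae then [pvEdgeItems graph "augmented_edges"] else [])
  maps.foldl (fun pairs em =>
    em.foldl (fun pairs p =>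
      if pvOkRel vr p.2 then
        pairs ++ [if inv then (p.1.2, (p.1.1, p.2)) else (p.1.1, (p.1.2, p.2))]
      else pairs) pairs) []

-- adj: source -> [(dst, rel), …]   (setdefault(src, []).append(e))
def pvAdj (graph : List (String × List (String × String × String))) (inv : Bool)
    (vr : Option (List String)) (iae : Bool) : PySem.Dict String (List (String × String)) :=
  (pvPairs graph inv vr iae).foldl (fun d q => d.modify q.1 [] (· ++ [q.2])) PySem.Dict.empty

-- dfs(nid): one global result dict and seen set threaded through the recursion
def pvGoB (adj : PySem.Dict String (List (String × String))) :
    Nat → List (String × String) → PySem.Dict String String → PySem.Set String →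
    PySem.Dict String String × PySem.Set String
  | _, [], related, seen => (related, seen)
  | 0, _ :: _, related, seen => (related, seen)
  | fuel+1, (dst, rel) :: rest, related, seen =>
    if seen.contains dst then
      pvGoB adj (fuel+1) rest related seen
    else
      let r := pvGoB adj fuel (adj.getD dst []) (related.insert dst rel) (seen.add dst)
      pvGoB adj (fuel+1) rest r.1 r.2
  termination_by fuel rest => (fuel, rest.length)
  decreasing_by all_goals simp_wf <;> omega

def get_related_nodes_multi_hop_alt (graph : List (String × List (String × String × String))) (node_id : String) (max_depth : Int) (inverse : Bool) (bidirectional : Bool) (valid_relations : Option (List String)) (include_augmented_edges : Bool) : List (String × String) :=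
  let adj := pvAdj graph inverse valid_relations include_augmented_edges
  let fuel := 2 * (((PySem.Dict.ofList graph).getD "edges" []).length
    + ((PySem.Dict.ofList graph).getD "augmented_edges" []).length) + 1
  (pvGoB adj fuel (adj.getD node_id []) PySem.Dict.empty (PySem.Set.ofList [node_id])).1.items

-- ===== PRECONDITION & SPEC =====
-- Pre_ admits every graph that is the encoding of a real Python dict: it excludes only
-- association lists whose 'edges' / 'augmented_edges' entry repeats an (src, dst) key —
-- no Python dict input can carry such a repeat (dict construction collapses it), so the
-- exclusion is an artefact of the list encoding, not of A's domain.
def Pre_get_related_nodes_multi_hop (graph : List (String × List (String × String × String))) (node_id : String) (max_depth : Int) (inverse : Bool) (bidirectional : Bool) (valid_relations : Option (List String)) (include_augmented_edges : Bool) : Prop :=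
  (((PySem.Dict.ofList graph).getD "edges" []).map (fun e => (e.1, e.2.1))).Nodup ∧
  (((PySem.Dict.ofList graph).getD "augmented_edges" []).map (fun e => (e.1, e.2.1))).Nodup
instance (graph : List (String × List (String × String × String))) (node_id : String) (max_depth : Int) (inverse : Bool) (bidirectional : Bool) (valid_relations : Option (List String)) (include_augmented_edges : Bool) : Decidable (Pre_get_related_nodes_multi_hop graph node_id max_depth inverse bidirectional valid_relations include_augmented_edges) := by unfold Pre_get_related_nodes_multi_hop; infer_instance
def pvWitness_get_related_nodes_multi_hop : (List (String × List (String × String × String))) × String × Int × Bool × Bool × Option (List String) × Bool :=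
  ([("edges", [("a", "b", "likes"), ("b", "c", "knows")])], "a", -1, false, false, none, false)
def Spec_get_related_nodes_multi_hop (graph : List (String × List (String × String × String))) (node_id : String) (max_depth : Int) (inverse : Bool) (bidirectional : Bool) (valid_relations : Option (List String)) (include_augmented_edges : Bool) (out : List (String × String)) : Prop := out = get_related_nodes_multi_hop_alt graph node_id max_depth inverse bidirectional valid_relations include_augmented_edges
instance (graph : List (String × List (String × String × String))) (node_id : String) (max_depth : Int) (inverse : Bool) (bidirectional : Bool) (valid_relations : Option (List String)) (include_augmented_edges : Bool) (out : List (String × String)) : Decidable (Spec_get_related_nodes_multi_hop graph node_id max_depth inverse bidirectional valid_relations include_augmented_edges out) := by unfold Spec_get_related_nodes_multi_hop; infer_instance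

-- ===== CLAIM (what is proved, stated in full; the proofs are below) =====
def Claim_equal_get_related_nodes_multi_hop : Prop := ∀ (graph : List (String × List (String × String × String))) (node_id : String) (max_depth : Int) (inverse : Bool) (bidirectional : Bool) (valid_relations : Option (List String)) (include_augmented_edges : Bool), Dom_get_related_nodes_multi_hop graph node_id max_depth inverse bidirectional valid_relations include_augmented_edges → Pre_get_related_nodes_multi_hop graph node_id max_depth inverse bidirectional valid_relations include_augmented_edges → Spec_get_related_nodes_multi_hop graph node_id max_depth inverse bidirectional valid_relations include_augmented_edges (get_related_nodes_multi_hop graph node_id max_depth inverse bidirectional valid_relations include_augmented_edges)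

-- ===== LEMMAS AND PROOFS =====

-- B's adjacency index, looked up at nid, is exactly A's per-node scan of both edge dicts
lemma pvNeighbors (graph : List (String × List (String × String × String)))
    (vr : Option (List String)) (iae : Bool) (inv : Bool) (nid : String) :
    (pvAdj graph inv vr iae).getD nid [] = pvGrnCore graph nid inv vr iae := by
  unfold pvAdj pvPairs pvGrnCore
  rw [PySem.Dict.getD_foldl_modify_append]
  cases inv <;> cases iae <;>
    simp only [Bool.false_eq_true, if_false, if_true, List.cons_append, List.nil_append,
      List.foldl_cons, List.foldl_nil, PySem.List.foldl_append_if, PySem.Dict.getD_empty,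
      List.filter_append, List.filter_map, List.map_append, List.map_map,
      List.filter_filter] <;>
    simp [Function.comp_def, Bool.and_comm]

-- unfolding lemmas for the two DFS recursions
lemma goA_nil (graph : List (String × List (String × String × String)))
    (vr : Option (List String)) (iae : Bool) (md : Int) (inv : Bool)
    (fuel : Nat) (depth : Int) (d : PySem.Dict String String) (seen : PySem.Set String) :
    pvGoA graph vr iae md inv fuel [] depth d seen = (d, seen) := by
  cases fuel <;> simp [pvGoA]

lemma goA_seen (graph : List (String × List (String × String × String)))
    (vr : Option (List String)) (iae : Bool) (md : Int) (inv : Bool)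
    (rid : String) (rel : String) (tl : List (String × String)) (fuel : Nat)
    (depth : Int) (d : PySem.Dict String String) (seen : PySem.Set String)
    (h : seen.contains rid = true) :
    pvGoA graph vr iae md inv (fuel+1) ((rid, rel) :: tl) depth d seen
      = pvGoA graph vr iae md inv (fuel+1) tl depth d seen := by
  rw [pvGoA, if_pos h]

lemma goA_new (graph : List (String × List (String × String × String)))
    (vr : Option (List String)) (iae : Bool) (md : Int) (inv : Bool)
    (rid : String) (rel : String) (tl : List (String × String)) (fuel : Nat)
    (depth : Int) (d : PySem.Dict String String) (seen : PySem.Set String)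
    (h : seen.contains rid = false) :
    pvGoA graph vr iae md inv (fuel+1) ((rid, rel) :: tl) depth d seen
      = (let child := pvGoA graph vr iae md inv fuel (pvGrn graph rid inv false vr iae)
            (if md > 0 then depth - 1 else -1) PySem.Dict.empty (seen.add rid);
         pvGoA graph vr iae md inv (fuel+1) tl depth ((d.insert rid rel).update child.1.items) child.2) := by
  rw [pvGoA, if_neg (by simpa using h)]

lemma goB_nil (adj : PySem.Dict String (List (String × String)))
    (fuel : Nat) (d : PySem.Dict String String) (seen : PySem.Set String) :
    pvGoB adj fuel [] d seen = (d, seen) := by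
  cases fuel <;> simp [pvGoB]

lemma goB_seen (adj : PySem.Dict String (List (String × String)))
    (rid : String) (rel : String) (tl : List (String × String)) (fuel : Nat)
    (d : PySem.Dict String String) (seen : PySem.Set String)
    (h : seen.contains rid = true) :
    pvGoB adj (fuel+1) ((rid, rel) :: tl) d seen = pvGoB adj (fuel+1) tl d seen := by
  rw [pvGoB, if_pos h]

lemma goB_new (adj : PySem.Dict String (List (String × String)))
    (rid : String) (rel : String) (tl : List (String × String)) (fuel : Nat)
    (d : PySem.Dict String String) (seen : PySem.Set String)
    (h : seen.contains rid = false) :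
    pvGoB adj (fuel+1) ((rid, rel) :: tl) d seen
      = (let r := pvGoB adj fuel (adj.getD rid []) (d.insert rid rel) (seen.add rid);
         pvGoB adj (fuel+1) tl r.1 r.2) := by
  rw [pvGoB, if_neg (by simpa using h)]

-- main DFS invariant: on the same neighbour list and seen set, A's local-dict recursion and
-- B's threaded-accumulator recursion append the same fresh block Δ and end in the same seen set
lemma pvMain (graph : List (String × List (String × String × String)))
    (vr : Option (List String)) (iae : Bool) (max_depth : Int) (inv : Bool) :
    ∀ (fuel : Nat) (rest : List (String × String)) (depth : Int)
      (dA dB : PySem.Dict String String) (seen : PySem.Set String),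
      (∀ k ∈ dA.keys, k ∈ seen) → dA.keys.Nodup →
      (∀ k ∈ dB.keys, k ∈ seen) → dB.keys.Nodup →
      ∃ (Δ : List (String × String)) (s : PySem.Set String),
        (pvGoA graph vr iae max_depth inv fuel rest depth dA seen).1.items = dA.items ++ Δ ∧
        (pvGoA graph vr iae max_depth inv fuel rest depth dA seen).2 = s ∧
        (pvGoB (pvAdj graph inv vr iae) fuel rest dB seen).1.items = dB.items ++ Δ ∧
        (pvGoB (pvAdj graph inv vr iae) fuel rest dB seen).2 = s ∧
        (∀ k ∈ Δ.map Prod.fst, k ∉ seen ∧ k ∈ s) ∧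
        (Δ.map Prod.fst).Nodup ∧
        (∀ x ∈ seen, x ∈ s) := by
  intro fuel
  induction fuel with
  | zero =>
    intro rest depth dA dB seen hAk hAnd hBk hBnd
    refine ⟨[], seen, ?_, ?_, ?_, ?_, by simp, by simp, fun x hx => hx⟩ <;>
      cases rest <;> simp [pvGoA, pvGoB]
  | succ fuel ih =>
    intro rest
    induction rest with
    | nil =>
      intro depth dA dB seen hAk hAnd hBk hBnd
      exact ⟨[], seen, by rw [goA_nil]; simp, by rw [goA_nil], by rw [goB_nil]; simp,
        by rw [goB_nil], by simp, by simp, fun x hx => hx⟩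
    | cons hd tl ih2 =>
      obtain ⟨rid, rel⟩ := hd
      intro depth dA dB seen hAk hAnd hBk hBnd
      by_cases hmem : rid ∈ seen
      · have hc : seen.contains rid = true := (PySem.Set.contains_iff seen rid).mpr hmem
        rw [goA_seen graph vr iae max_depth inv rid rel tl fuel depth dA seen hc,
            goB_seen (pvAdj graph inv vr iae) rid rel tl fuel dB seen hc]
        exact ih2 depth dA dB seen hAk hAnd hBk hBnd
      · have hc : seen.contains rid = false := by
          cases h : seen.contains rid
          · rfl
          · exact ((hmem ((PySem.Set.contains_iff seen rid).mp h))).elim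
        rw [goA_new graph vr iae max_depth inv rid rel tl fuel depth dA seen hc,
            goB_new (pvAdj graph inv vr iae) rid rel tl fuel dB seen hc]
        simp only []
        have hE : pvGrn graph rid inv false vr iae = (pvAdj graph inv vr iae).getD rid [] := by
          rw [pvNeighbors]; simp [pvGrn]
        rw [hE]
        -- the nested (child) calls
        have hridadd : rid ∈ seen.add rid := (PySem.Set.mem_add _ _ _).mpr (Or.inr rfl)
        have hBnotc : dB.contains rid = false := by
          cases h : dB.contains rid
          · rfl
          · exact (hmem (hBk rid ((PySem.Dict.contains_iff_mem_keys dB rid).mp h))).elim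
        have hAnotc : dA.contains rid = false := by
          cases h : dA.contains rid
          · rfl
          · exact (hmem (hAk rid ((PySem.Dict.contains_iff_mem_keys dA rid).mp h))).elim
        have hBkeys : (dB.insert rid rel).keys = dB.keys ++ [rid] :=
          PySem.Dict.keys_insert_of_not_contains dB rel hBnotc
        have hAitems : (dA.insert rid rel).items = dA.items ++ [(rid, rel)] :=
          PySem.Dict.items_insert_of_not_contains dA rel hAnotc
        have hBitems : (dB.insert rid rel).items = dB.items ++ [(rid, rel)] :=
          PySem.Dict.items_insert_of_not_contains dB rel hBnotc
        obtain ⟨Δc, sc, hc1, hc2, hc3, hc4, hc5, hc6, hc7⟩ :=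
          ih ((pvAdj graph inv vr iae).getD rid []) (if max_depth > 0 then depth - 1 else -1)
            PySem.Dict.empty (dB.insert rid rel) (seen.add rid)
            (by simp [PySem.Dict.keys_empty]) (by simp [PySem.Dict.keys_empty])
            (by
              intro k hk
              rw [hBkeys] at hk
              rcases List.mem_append.mp hk with h' | h'
              · exact (PySem.Set.mem_add _ _ _).mpr (Or.inl (hBk k h'))
              · simp at h'; subst h'; exact hridadd)
            (by
              rw [hBkeys]
              refine List.Nodup.append hBnd (List.nodup_singleton rid) ?_
              intro a ha hb
              simp at hb; subst hb
              exact hmem (hBk a ha))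
        have hcA1 : (pvGoA graph vr iae max_depth inv fuel
            ((pvAdj graph inv vr iae).getD rid []) (if max_depth > 0 then depth - 1 else -1)
            PySem.Dict.empty (seen.add rid)).1.items = Δc := by simpa using hc1
        -- facts about the fresh block Δc
        have hsub : ∀ x ∈ seen, x ∈ sc :=
          fun x hx => hc7 x ((PySem.Set.mem_add _ _ _).mpr (Or.inl hx))
        have hΔc_not_seen : ∀ k ∈ Δc.map Prod.fst, k ∉ seen :=
          fun k hk hxk => (hc5 k hk).1 ((PySem.Set.mem_add _ _ _).mpr (Or.inl hxk))
        have hΔc_sc : ∀ k ∈ Δc.map Prod.fst, k ∈ sc := fun k hk => (hc5 k hk).2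
        have hΔc_ne_rid : ∀ k ∈ Δc.map Prod.fst, k ≠ rid :=
          fun k hk h' => (hc5 k hk).1 (h' ▸ hridadd)
        have hrid_sc : rid ∈ sc := hc7 rid hridadd
        -- A's merged dict: insert-then-update over fresh keys appends
        have hfreshA : ∀ a ∈ Δc, (dA.insert rid rel).contains a.1 = false := by
          intro a ha
          cases h : (dA.insert rid rel).contains a.1
          · rfl
          · have hk := (PySem.Dict.contains_iff_mem_keys _ _).mp h
            rw [PySem.Dict.keys_insert_of_not_contains dA rel hAnotc] at hk
            have hmapa : a.1 ∈ Δc.map Prod.fst := List.mem_map_of_mem ha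
            rcases List.mem_append.mp hk with h' | h'
            · exact (hΔc_not_seen a.1 hmapa (hAk a.1 h')).elim
            · simp at h'; exact (hΔc_ne_rid a.1 hmapa h').elim
        have hupd : ((dA.insert rid rel).update Δc).items = dA.items ++ [(rid, rel)] ++ Δc := by
          have h := PySem.Dict.items_foldl_insert_fresh Δc Prod.fst Prod.snd
            (dA.insert rid rel) hfreshA hc6
          rw [show (dA.insert rid rel).update Δc
              = Δc.foldl (fun d a => d.insert a.1 a.2) (dA.insert rid rel) from rfl]
          rw [h, hAitems]
          simp
        -- invariants for the continuation over tl, starting from sc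
        have hkeysfromitems : ∀ (d0 dn : PySem.Dict String String),
            (∀ k ∈ d0.keys, k ∈ seen) → d0.keys.Nodup →
            dn.items = d0.items ++ [(rid, rel)] ++ Δc →
            (∀ k ∈ dn.keys, k ∈ sc) ∧ dn.keys.Nodup := by
          intro d0 dn hk0 hnd0 hitems
          have hkeys : dn.keys = d0.keys ++ [rid] ++ Δc.map Prod.fst := by
            simp [PySem.Dict.keys, hitems]
          constructor
          · intro k hk
            rw [hkeys] at hk
            rcases List.mem_append.mp hk with h' | h'
            · rcases List.mem_append.mp h' with h'' | h''
              · exact hsub k (hk0 k h'')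
              · simp at h''; subst h''; exact hrid_sc
            · exact hΔc_sc k h'
          · rw [hkeys]
            refine List.Nodup.append (List.Nodup.append hnd0 (List.nodup_singleton rid) ?_) hc6 ?_
            · intro a ha hb
              simp at hb; subst hb
              exact hmem (hk0 a ha)
            · intro a ha hb
              rcases List.mem_append.mp ha with h' | h'
              · exact hΔc_not_seen a hb (hk0 a h')
              · simp at h'
                exact hΔc_ne_rid a hb h' 
        have hinvA := hkeysfromitems dA ((dA.insert rid rel).update Δc) hAk hAnd hupd
        have hinvB := hkeysfromitems dB
          (pvGoB (pvAdj graph inv vr iae) fuel ((pvAdj graph inv vr iae).getD rid [])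
            (dB.insert rid rel) (seen.add rid)).1 hBk hBnd (by rw [hc3, hBitems])
        obtain ⟨Δt, st, ht1, ht2, ht3, ht4, ht5, ht6, ht7⟩ :=
          ih2 depth ((dA.insert rid rel).update Δc)
            (pvGoB (pvAdj graph inv vr iae) fuel ((pvAdj graph inv vr iae).getD rid [])
              (dB.insert rid rel) (seen.add rid)).1 sc hinvA.1 hinvA.2 hinvB.1 hinvB.2
        refine ⟨(rid, rel) :: (Δc ++ Δt), st, ?_, ?_, ?_, ?_, ?_, ?_, ?_⟩
        · rw [hcA1, hc2, ht1, hupd]; simp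
        · rw [hcA1, hc2]; exact ht2
        · rw [hc4, ht3, hc3, hBitems]; simp
        · rw [hc4]; exact ht4
        · intro k hk
          simp only [List.map_cons, List.map_append, List.mem_cons, List.mem_append] at hk
          rcases hk with h0 | hk'
          · exact ⟨h0 ▸ hmem, h0 ▸ ht7 rid (hc7 rid hridadd)⟩
          · rcases hk' with h' | h'
            · exact ⟨hΔc_not_seen k h', ht7 k (hΔc_sc k h')⟩
            · refine ⟨fun hxk => (ht5 k h').1 (hsub k hxk), (ht5 k h').2⟩
        · simp only [List.map_cons, List.map_append]
          refine List.Nodup.cons ?_ (List.Nodup.append hc6 ht6 ?_)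
          · intro h'
            rcases List.mem_append.mp h' with h'' | h''
            · exact hΔc_ne_rid rid h'' rfl
            · exact (ht5 rid h'').1 hrid_sc
          · intro a ha hb
            exact (ht5 a hb).1 (hΔc_sc a ha)
        · exact fun x hx => ht7 x (hsub x hx)

-- ===== VERDICT (by name: the statement is the Claim_ definition above) =====
theorem get_related_nodes_multi_hop_spec : Claim_equal_get_related_nodes_multi_hop := by
  intro graph node_id max_depth inverse bidirectional valid_relations include_augmented_edges _ _pre
  unfold Spec_get_related_nodes_multi_hop
  unfold get_related_nodes_multi_hop get_related_nodes_multi_hop_alt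
  obtain ⟨Δ, s, hA, -, hB, -, -⟩ :=
    pvMain graph valid_relations include_augmented_edges max_depth inverse
      (2 * (((PySem.Dict.ofList graph).getD "edges" []).length
        + ((PySem.Dict.ofList graph).getD "augmented_edges" []).length) + 1)
      ((pvAdj graph inverse valid_relations include_augmented_edges).getD node_id [])
      max_depth PySem.Dict.empty PySem.Dict.empty (PySem.Set.ofList [node_id])
      (by simp [PySem.Dict.keys_empty]) (by simp [PySem.Dict.keys_empty])
      (by simp [PySem.Dict.keys_empty]) (by simp [PySem.Dict.keys_empty])
  rw [pvNeighbors graph valid_relations include_augmented_edges inverse node_id] at hA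
  rw [show pvGrn graph node_id inverse false valid_relations include_augmented_edges
      = pvGrnCore graph node_id inverse valid_relations include_augmented_edges by simp [pvGrn]]
  simp only [hA, hB]
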